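-- pv_equiv track=rewrite | github.com/wonyangs/Algorithm | BOJ/Implementation/17825.py | isDice
-- ===== SOURCE A (Python) =====
-- def isDice(n, dice):
--     for i in dice:
--         if i == n:
--             return True
--         for pool in same_num:
--             if n in pool and i in pool:
--                 return True
--     return False
--
-- same_num = [[5, 21], [10, 29], [15, 36], [25, 32, 40], [26, 33, 41], [27, 34, 42], [28, 35, 43, 20]]
-- ===== SOURCE B (Python) =====
-- same_num = [[5, 21], [10, 29], [15, 36], [25, 32, 40], [26, 33, 41], [27, 34, 42], [28, 35, 43, 20]]
--
-- # canonical representative for every pooled position, built once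
-- _canon = {}
-- for _pool in same_num:
--     _rep = _pool[0]
--     for _p in _pool:
--         _canon[_p] = _rep
--
--
-- def isDice(n, dice):
--     cn = _canon.get(n, n)
--     return cn in {_canon.get(i, i) for i in dice}
-- ===== Notes on version B (the rewrite author's own statement) =====
-- stated objective: simpler
-- what changed: Replaces the nested dice-by-pools rescan with a canonical-representative map built once from the table: each position maps to its pool's first element, and the test is a single membership of n's canonical key in the set of the dice's canonical keys.
import Mathlib
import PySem

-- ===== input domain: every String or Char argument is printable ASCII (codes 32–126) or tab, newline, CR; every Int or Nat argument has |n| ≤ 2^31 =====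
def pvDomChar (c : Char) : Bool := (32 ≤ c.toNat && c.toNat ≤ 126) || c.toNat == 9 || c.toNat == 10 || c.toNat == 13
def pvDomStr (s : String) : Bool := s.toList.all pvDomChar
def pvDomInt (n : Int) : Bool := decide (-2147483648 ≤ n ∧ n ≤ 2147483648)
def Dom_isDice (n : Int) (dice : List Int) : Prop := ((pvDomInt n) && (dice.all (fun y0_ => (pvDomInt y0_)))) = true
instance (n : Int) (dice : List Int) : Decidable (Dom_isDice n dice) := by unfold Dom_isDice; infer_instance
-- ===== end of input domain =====

-- B replaces A's nested dice-by-pools rescan with a canonical-representative map built once; objective: simpler.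


-- ===== PORT A =====
def sameNum : List (List Int) :=
  [[5, 21], [10, 29], [15, 36], [25, 32, 40], [26, 33, 41], [27, 34, 42], [28, 35, 43, 20]]

-- inner 'for pool in same_num' loop of A
def isDicePools (n i : Int) : List (List Int) → Bool
  | [] => false
  | pool :: rest => if pool.contains n && pool.contains i then true else isDicePools n i rest

-- outer 'for i in dice' loop of A
def isDiceLoop (n : Int) : List Int → Bool
  | [] => false
  | i :: rest =>
    if i == n then true
    else if isDicePools n i sameNum then true
    else isDiceLoop n rest

def isDice (n : Int) (dice : List Int) : Bool := isDiceLoop n dice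

-- ===== PORT B =====
-- _canon of Source B: built once from the table; pool[0] ported as headD 0 (every pool of the literal table is nonempty)
def canonDict : PySem.Dict Int Int :=
  sameNum.foldl (fun d pool => pool.foldl (fun d p => d.insert p (pool.headD 0)) d) PySem.Dict.empty

def isDice_alt (n : Int) (dice : List Int) : Bool :=
  let cn := canonDict.getD n n
  PySem.Set.contains (PySem.Set.ofList (dice.map (fun i => canonDict.getD i i))) cn

-- ===== PRECONDITION & SPEC =====
def Spec_isDice (n : Int) (dice : List Int) (out : Bool) : Prop := out = isDice_alt n dice
instance (n : Int) (dice : List Int) (out : Bool) : Decidable (Spec_isDice n dice out) := by unfold Spec_isDice; infer_instance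

-- ===== CLAIM (what is proved, stated in full; the proofs are below) =====
def Claim_equal_isDice : Prop := ∀ (n : Int) (dice : List Int), Dom_isDice n dice → Spec_isDice n dice (isDice n dice)

-- ===== LEMMAS AND PROOFS =====

def canon (x : Int) : Int := canonDict.getD x x

def allPos : List Int := sameNum.flatten

lemma canonDict_eq : canonDict = PySem.Dict.mk
    [(5,5),(21,5),(10,10),(29,10),(15,15),(36,15),(25,25),(32,25),(40,25),
     (26,26),(33,26),(41,26),(27,27),(34,27),(42,27),(28,28),(35,28),(43,28),(20,28)] := by
  decide

lemma canon_of_not_mem (x : Int) (hx : x ∉ allPos) : canon x = x := by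
  simp [allPos, sameNum, not_or] at hx
  obtain ⟨h1,h2,h3,h4,h5,h6,h7,h8,h9,h10,h11,h12,h13,h14,h15,h16,h17,h18,h19⟩ := hx
  have H1 : ¬((5:Int) = x) := fun h => h1 h.symm
  have H2 : ¬((21:Int) = x) := fun h => h2 h.symm
  have H3 : ¬((10:Int) = x) := fun h => h3 h.symm
  have H4 : ¬((29:Int) = x) := fun h => h4 h.symm
  have H5 : ¬((15:Int) = x) := fun h => h5 h.symm
  have H6 : ¬((36:Int) = x) := fun h => h6 h.symm
  have H7 : ¬((25:Int) = x) := fun h => h7 h.symm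
  have H8 : ¬((32:Int) = x) := fun h => h8 h.symm
  have H9 : ¬((40:Int) = x) := fun h => h9 h.symm
  have H10 : ¬((26:Int) = x) := fun h => h10 h.symm
  have H11 : ¬((33:Int) = x) := fun h => h11 h.symm
  have H12 : ¬((41:Int) = x) := fun h => h12 h.symm
  have H13 : ¬((27:Int) = x) := fun h => h13 h.symm
  have H14 : ¬((34:Int) = x) := fun h => h14 h.symm
  have H15 : ¬((42:Int) = x) := fun h => h15 h.symm
  have H16 : ¬((28:Int) = x) := fun h => h16 h.symm
  have H17 : ¬((35:Int) = x) := fun h => h17 h.symm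
  have H18 : ¬((43:Int) = x) := fun h => h18 h.symm
  have H19 : ¬((20:Int) = x) := fun h => h19 h.symm
  simp only [canon, canonDict_eq, PySem.Dict.getD_eq_get?_getD, PySem.Dict.get?_mk_cons,
    beq_iff_eq, if_neg H1, if_neg H2, if_neg H3, if_neg H4, if_neg H5, if_neg H6, if_neg H7, if_neg H8, if_neg H9, if_neg H10, if_neg H11, if_neg H12, if_neg H13, if_neg H14, if_neg H15, if_neg H16, if_neg H17, if_neg H18, if_neg H19]
  rfl

lemma pools_false_right (n i : Int) (hi : i ∉ allPos) : isDicePools n i sameNum = false := by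
  simp [allPos, sameNum, not_or] at hi
  obtain ⟨h1,h2,h3,h4,h5,h6,h7,h8,h9,h10,h11,h12,h13,h14,h15,h16,h17,h18,h19⟩ := hi
  simp [isDicePools, sameNum, h1,h2,h3,h4,h5,h6,h7,h8,h9,h10,h11,h12,h13,h14,h15,h16,h17,h18,h19]

lemma pools_false_left (n i : Int) (hn : n ∉ allPos) : isDicePools n i sameNum = false := by
  simp [allPos, sameNum, not_or] at hn
  obtain ⟨h1,h2,h3,h4,h5,h6,h7,h8,h9,h10,h11,h12,h13,h14,h15,h16,h17,h18,h19⟩ := hn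
  simp [isDicePools, sameNum, h1,h2,h3,h4,h5,h6,h7,h8,h9,h10,h11,h12,h13,h14,h15,h16,h17,h18,h19]

lemma canon_mem (x : Int) (hx : x ∈ allPos) : canon x ∈ allPos := by
  simp [allPos, sameNum] at hx ⊢
  rcases hx with rfl|rfl|rfl|rfl|rfl|rfl|rfl|rfl|rfl|rfl|rfl|rfl|rfl|rfl|rfl|rfl|rfl|rfl|rfl <;> decide

-- pointwise agreement of A's per-die test and B's canonical-key test
lemma pointwise (n i : Int) :
    ((i == n) || isDicePools n i sameNum) = (canon i == canon n) := by
  by_cases hn : n ∈ allPos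
  · by_cases hi : i ∈ allPos
    · simp [allPos, sameNum] at hn hi
      rcases hn with rfl|rfl|rfl|rfl|rfl|rfl|rfl|rfl|rfl|rfl|rfl|rfl|rfl|rfl|rfl|rfl|rfl|rfl|rfl <;> rcases hi with rfl|rfl|rfl|rfl|rfl|rfl|rfl|rfl|rfl|rfl|rfl|rfl|rfl|rfl|rfl|rfl|rfl|rfl|rfl <;> decide
    · have hne1 : i ≠ n := fun h => hi (h ▸ hn)
      have hne2 : i ≠ canon n := fun h => hi (h ▸ canon_mem n hn)
      rw [pools_false_right n i hi, canon_of_not_mem i hi]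
      simp [hne1, hne2]
  · have hcn : canon n = n := canon_of_not_mem n hn
    rw [pools_false_left n i hn, hcn]
    by_cases hi : i ∈ allPos
    · have hne1 : i ≠ n := fun h => hn (h ▸ hi)
      have hne2 : canon i ≠ n := fun h => hn (h ▸ canon_mem i hi)
      simp [hne1, hne2]
    · rw [canon_of_not_mem i hi]
      simp

lemma loop_eq_any (n : Int) (dice : List Int) :
    isDiceLoop n dice = dice.any (fun i => (i == n) || isDicePools n i sameNum) := by
  induction dice with
  | nil => rfl
  | cons i rest ih =>
    rw [List.any_cons, ← ih]
    simp only [isDiceLoop]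
    by_cases h1 : i == n <;> by_cases h2 : isDicePools n i sameNum <;> simp [h1, h2]

lemma alt_eq_any (n : Int) (dice : List Int) :
    isDice_alt n dice = dice.any (fun i => canon i == canon n) := by
  simp only [isDice_alt, canon]
  rw [Bool.eq_iff_iff]
  simp only [PySem.Set.contains_iff, PySem.Set.mem_ofList, List.mem_map, List.any_eq_true,
    beq_iff_eq]

-- ===== VERDICT (by name: the statement is the Claim_ definition above) =====
theorem isDice_spec : Claim_equal_isDice := by
  intro n dice _
  unfold Spec_isDice
  rw [show isDice n dice = isDiceLoop n dice from rfl, loop_eq_any, alt_eq_any]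
  congr 1
  exact funext (pointwise n)
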